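-- pv_equiv track=rewrite | github.com/sudo-Itramplay/P3IA | 2nExc/board.py | _is_square_attacked_by_rook
-- ===== SOURCE A (Python) =====
-- def _is_square_attacked_by_rook(square, rooks, occupancy):
--     """Comprova si una casella (fila,col) està atacada per alguna torre segons ocupació."""
--     sr, sc = square
--     for rr, rc, _ in rooks:
--         if rr == sr:
--             step = 1 if rc < sc else -1
--             blocked = any(((rr, cc) in occupancy) for cc in range(rc + step, sc, step))
--             if not blocked:
--                 return True
--         if rc == sc:
--             step = 1 if rr < sr else -1
--             blocked = any(((rrr, rc) in occupancy) for rrr in range(rr + step, sr, step))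
--             if not blocked:
--                 return True
--     return False
-- ===== SOURCE B (Python) =====
-- def _is_square_attacked_by_rook(square, rooks, occupancy):
--     """Directional re-decomposition: find the nearest aligned rook in each of the
--     four directions, then scan occupancy once per direction (never iterates board
--     cells, so cost is independent of distances)."""
--     sr, sc = square
--     left = right = down = up = None
--     for rr, rc, _ in rooks:
--         if rr == sr and rc == sc:
--             return True
--         if rr == sr:
--             if rc < sc:
--                 if left is None or rc > left:
--                     left = rc
--             else:
--                 if right is None or rc < right:
--                     right = rc
--         elif rc == sc:
--             if rr < sr:
--                 if down is None or rr > down: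
--                     down = rr
--             else:
--                 if up is None or rr < up:
--                     up = rr
--     if left is not None and not any(r == sr and left < c < sc for r, c in occupancy):
--         return True
--     if right is not None and not any(r == sr and sc < c < right for r, c in occupancy):
--         return True
--     if down is not None and not any(c == sc and down < r < sr for r, c in occupancy):
--         return True
--     if up is not None and not any(c == sc and sr < r < up for r, c in occupancy):
--         return True
--     return False
-- ===== Notes on version B (the rewrite author's own statement) =====
-- stated objective: faster
-- what changed: Instead of scanning, for every rook, each board cell strictly between the rook and the square, B makes one pass over the rooks keeping only the nearest aligned rook per direction (left/right/down/up, with an early True for a rook on the square) and then scans the occupancy list once per direction for a blocker strictly between that nearest rook and the square.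
import Mathlib
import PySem

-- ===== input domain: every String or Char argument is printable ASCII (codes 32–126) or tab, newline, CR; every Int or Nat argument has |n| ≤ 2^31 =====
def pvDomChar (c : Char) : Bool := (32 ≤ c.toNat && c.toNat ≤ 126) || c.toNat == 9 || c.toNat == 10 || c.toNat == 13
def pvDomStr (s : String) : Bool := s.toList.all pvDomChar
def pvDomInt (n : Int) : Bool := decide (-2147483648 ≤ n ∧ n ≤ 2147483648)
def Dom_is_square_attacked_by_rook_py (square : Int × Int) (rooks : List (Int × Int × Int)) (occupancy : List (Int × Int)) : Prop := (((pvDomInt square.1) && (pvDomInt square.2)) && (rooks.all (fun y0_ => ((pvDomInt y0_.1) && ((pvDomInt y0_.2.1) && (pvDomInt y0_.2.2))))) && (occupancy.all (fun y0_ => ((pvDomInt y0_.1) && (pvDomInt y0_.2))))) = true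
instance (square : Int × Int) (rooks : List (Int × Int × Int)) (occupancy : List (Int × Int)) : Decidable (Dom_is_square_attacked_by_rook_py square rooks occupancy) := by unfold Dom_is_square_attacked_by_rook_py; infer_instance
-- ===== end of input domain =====

-- B replaces A's per-rook scan of every board cell between rook and square by a single pass
-- bucketing the nearest aligned rook in each of the four directions plus one occupancy scan
-- per direction (objective: faster — cost independent of board distances).

-- ===== PORT A =====
-- literal transliteration of A's loop: for each rook, scan the cells strictly between
-- rook and square (range with step ±1) for occupancy; early return True when unblocked.
def aLoop (sr sc : Int) (occupancy : List (Int × Int)) : List (Int × Int × Int) → Bool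
  | [] => false
  | (rr, rc, _) :: rest =>
    let step1 : Int := if rc < sc then 1 else -1
    let blockedRow := (PySem.List.pyRange (rc + step1) sc step1).any (fun cc => decide ((rr, cc) ∈ occupancy))
    if rr = sr ∧ blockedRow = false then true
    else
      let step2 : Int := if rr < sr then 1 else -1
      let blockedCol := (PySem.List.pyRange (rr + step2) sr step2).any (fun rrr => decide ((rrr, rc) ∈ occupancy))
      if rc = sc ∧ blockedCol = false then true
      else aLoop sr sc occupancy rest

def is_square_attacked_by_rook_py (square : Int × Int) (rooks : List (Int × Int × Int)) (occupancy : List (Int × Int)) : Bool :=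
  aLoop square.1 square.2 occupancy rooks

-- ===== PORT B =====
-- `left is None or rc > left: left = rc`
def updMax (o : Option Int) (v : Int) : Option Int :=
  match o with
  | none => some v
  | some w => if w < v then some v else some w

def updMin (o : Option Int) (v : Int) : Option Int :=
  match o with
  | none => some v
  | some w => if v < w then some v else some w

-- B's single pass over the rooks: `none` = early `return True` (rook on the square),
-- otherwise the nearest rook column/row in each of the four directions.
def bLoop (sr sc : Int) : List (Int × Int × Int) → Option Int → Option Int → Option Int → Option Int → Option (Option Int × Option Int × Option Int × Option Int)
  | [], l, r, d, u => some (l, r, d, u)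
  | (rr, rc, _) :: rest, l, r, d, u =>
    if rr = sr ∧ rc = sc then none
    else if rr = sr then
      (if rc < sc then bLoop sr sc rest (updMax l rc) r d u
       else bLoop sr sc rest l (updMin r rc) d u)
    else if rc = sc then
      (if rr < sr then bLoop sr sc rest l r (updMax d rr) u
       else bLoop sr sc rest l r d (updMin u rr))
    else bLoop sr sc rest l r d u

def is_square_attacked_by_rook_py_alt (square : Int × Int) (rooks : List (Int × Int × Int)) (occupancy : List (Int × Int)) : Bool :=
  let sr := square.1
  let sc := square.2
  match bLoop sr sc rooks none none none none with
  | none => true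
  | some (l, r, d, u) =>
    if (match l with
        | some lv => !(occupancy.any (fun p => decide (p.1 = sr ∧ lv < p.2 ∧ p.2 < sc)))
        | none => false) then true
    else if (match r with
        | some rv => !(occupancy.any (fun p => decide (p.1 = sr ∧ sc < p.2 ∧ p.2 < rv)))
        | none => false) then true
    else if (match d with
        | some dv => !(occupancy.any (fun p => decide (p.2 = sc ∧ dv < p.1 ∧ p.1 < sr)))
        | none => false) then true
    else if (match u with
        | some uv => !(occupancy.any (fun p => decide (p.2 = sc ∧ sr < p.1 ∧ p.1 < uv)))
        | none => false) then true
    else false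

-- ===== PRECONDITION & SPEC =====
def Spec_is_square_attacked_by_rook_py (square : Int × Int) (rooks : List (Int × Int × Int)) (occupancy : List (Int × Int)) (out : Bool) : Prop := out = is_square_attacked_by_rook_py_alt square rooks occupancy
instance (square : Int × Int) (rooks : List (Int × Int × Int)) (occupancy : List (Int × Int)) (out : Bool) : Decidable (Spec_is_square_attacked_by_rook_py square rooks occupancy out) := by unfold Spec_is_square_attacked_by_rook_py; infer_instance

-- ===== CLAIM (what is proved, stated in full; the proofs are below) =====
def Claim_equal_is_square_attacked_by_rook_py : Prop := ∀ (square : Int × Int) (rooks : List (Int × Int × Int)) (occupancy : List (Int × Int)), Dom_is_square_attacked_by_rook_py square rooks occupancy → Spec_is_square_attacked_by_rook_py square rooks occupancy (is_square_attacked_by_rook_py square rooks occupancy)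

-- ===== LEMMAS AND PROOFS =====

-- "no occupied cell strictly between columns a and b (either orientation) in row rr"
def ClearRow (occ : List (Int × Int)) (rr a b : Int) : Prop :=
  ∀ x : Int, ((a < x ∧ x < b) ∨ (b < x ∧ x < a)) → (rr, x) ∉ occ

def ClearCol (occ : List (Int × Int)) (cc a b : Int) : Prop :=
  ∀ x : Int, ((a < x ∧ x < b) ∨ (b < x ∧ x < a)) → (x, cc) ∉ occ

-- the per-rook attack predicate A's loop tests
def PAtt (sr sc : Int) (occ : List (Int × Int)) (t : Int × Int × Int) : Prop :=
  (t.1 = sr ∧ ClearRow occ sr t.2.1 sc) ∨ (t.2.1 = sc ∧ ClearCol occ sc t.1 sr)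

theorem blockedRow_false_iff (rr rc sc : Int) (occ : List (Int × Int)) :
    ((PySem.List.pyRange (rc + (if rc < sc then (1:Int) else -1)) sc (if rc < sc then (1:Int) else -1)).any
        (fun cc => decide ((rr, cc) ∈ occ)) = false) ↔ ClearRow occ rr rc sc := by
  by_cases h : rc < sc
  · simp only [if_pos h, List.any_eq_false, PySem.List.mem_pyRange_one, decide_eq_true_eq, ClearRow]
    constructor
    · intro H x hx; rcases hx with ⟨h1, h2⟩ | ⟨h1, h2⟩
      · exact H x ⟨by omega, h2⟩
      · omega
    · intro H x hx; exact H x (Or.inl ⟨by omega, hx.2⟩)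
  · simp only [if_neg h, PySem.List.pyRange_neg_one_eq_reverse, List.any_reverse,
      List.any_eq_false, PySem.List.mem_pyRange_one, decide_eq_true_eq, ClearRow]
    constructor
    · intro H x hx; rcases hx with ⟨h1, h2⟩ | ⟨h1, h2⟩
      · omega
      · exact H x ⟨by omega, by omega⟩
    · intro H x hx; exact H x (Or.inr ⟨by omega, by omega⟩)

theorem blockedCol_false_iff (rr rc sr : Int) (occ : List (Int × Int)) :
    ((PySem.List.pyRange (rr + (if rr < sr then (1:Int) else -1)) sr (if rr < sr then (1:Int) else -1)).any
        (fun rrr => decide ((rrr, rc) ∈ occ)) = false) ↔ ClearCol occ rc rr sr := by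
  by_cases h : rr < sr
  · simp only [if_pos h, List.any_eq_false, PySem.List.mem_pyRange_one, decide_eq_true_eq, ClearCol]
    constructor
    · intro H x hx; rcases hx with ⟨h1, h2⟩ | ⟨h1, h2⟩
      · exact H x ⟨by omega, h2⟩
      · omega
    · intro H x hx; exact H x (Or.inl ⟨by omega, hx.2⟩)
  · simp only [if_neg h, PySem.List.pyRange_neg_one_eq_reverse, List.any_reverse,
      List.any_eq_false, PySem.List.mem_pyRange_one, decide_eq_true_eq, ClearCol]
    constructor
    · intro H x hx; rcases hx with ⟨h1, h2⟩ | ⟨h1, h2⟩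
      · omega
      · exact H x ⟨by omega, by omega⟩
    · intro H x hx; exact H x (Or.inr ⟨by omega, by omega⟩)

theorem aLoop_true_iff (sr sc : Int) (occ : List (Int × Int)) (rs : List (Int × Int × Int)) :
    aLoop sr sc occ rs = true ↔ ∃ t ∈ rs, PAtt sr sc occ t := by
  induction rs with
  | nil => simp [aLoop]
  | cons t rest ih =>
    obtain ⟨rr, rc, p⟩ := t
    simp only [aLoop]
    by_cases h1 : rr = sr ∧ ((PySem.List.pyRange (rc + (if rc < sc then (1:Int) else -1)) sc (if rc < sc then (1:Int) else -1)).any (fun cc => decide ((rr, cc) ∈ occ))) = false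
    · simp only [if_pos h1, true_iff]
      refine ⟨(rr, rc, p), List.mem_cons_self, Or.inl ⟨h1.1, ?_⟩⟩
      have hcl := (blockedRow_false_iff rr rc sc occ).mp h1.2
      rwa [h1.1] at hcl
    · rw [if_neg h1]
      by_cases h2 : rc = sc ∧ ((PySem.List.pyRange (rr + (if rr < sr then (1:Int) else -1)) sr (if rr < sr then (1:Int) else -1)).any (fun rrr => decide ((rrr, rc) ∈ occ))) = false
      · simp only [if_pos h2, true_iff]
        refine ⟨(rr, rc, p), List.mem_cons_self, Or.inr ⟨h2.1, ?_⟩⟩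
        have hcl := (blockedCol_false_iff rr rc sr occ).mp h2.2
        rwa [h2.1] at hcl
      · rw [if_neg h2, ih]
        constructor
        · rintro ⟨t, ht, hP⟩; exact ⟨t, List.mem_cons_of_mem _ ht, hP⟩
        · rintro ⟨t, ht, hP⟩
          rcases List.mem_cons.mp ht with rfl | hmem
          · exfalso
            rcases hP with ⟨he, hc⟩ | ⟨he, hc⟩
            · have he' : rr = sr := he
              subst he'
              exact h1 ⟨rfl, (blockedRow_false_iff rr rc sc occ).mpr hc⟩
            · have he' : rc = sc := he
              subst he'
              exact h2 ⟨rfl, (blockedCol_false_iff rr rc sr occ).mpr hc⟩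
          · exact ⟨t, hmem, hP⟩

-- ===== closed form for B's bucketing pass =====
def lbs (sr sc : Int) (rs : List (Int × Int × Int)) : List Int :=
  rs.filterMap (fun t => if t.1 = sr ∧ t.2.1 < sc then some t.2.1 else none)
def rbs (sr sc : Int) (rs : List (Int × Int × Int)) : List Int :=
  rs.filterMap (fun t => if t.1 = sr ∧ sc < t.2.1 then some t.2.1 else none)
def dbs (sr sc : Int) (rs : List (Int × Int × Int)) : List Int :=
  rs.filterMap (fun t => if t.2.1 = sc ∧ t.1 < sr then some t.1 else none)
def ubs (sr sc : Int) (rs : List (Int × Int × Int)) : List Int :=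
  rs.filterMap (fun t => if t.2.1 = sc ∧ sr < t.1 then some t.1 else none)

theorem bLoop_closed (sr sc : Int) : ∀ (rs : List (Int × Int × Int)) (l r d u : Option Int),
    bLoop sr sc rs l r d u =
      if ∃ t ∈ rs, t.1 = sr ∧ t.2.1 = sc then none
      else some ((lbs sr sc rs).foldl updMax l, (rbs sr sc rs).foldl updMin r,
                 (dbs sr sc rs).foldl updMax d, (ubs sr sc rs).foldl updMin u) := by
  intro rs
  induction rs with
  | nil => intro l r d u; simp [bLoop, lbs, rbs, dbs, ubs]
  | cons t rest ih =>
    intro l r d u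
    obtain ⟨rr, rc, p⟩ := t
    simp only [bLoop, lbs, rbs, dbs, ubs, List.filterMap_cons]
    by_cases h0 : rr = sr ∧ rc = sc
    · rw [if_pos h0, if_pos ⟨(rr, rc, p), List.mem_cons_self, h0⟩]
    · rw [if_neg h0]
      have hex : (∃ t ∈ (rr, rc, p) :: rest, t.1 = sr ∧ t.2.1 = sc) ↔ (∃ t ∈ rest, t.1 = sr ∧ t.2.1 = sc) := by
        constructor
        · rintro ⟨t, ht, hp⟩
          rcases List.mem_cons.mp ht with rfl | hm
          · exact absurd hp h0
          · exact ⟨t, hm, hp⟩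
        · rintro ⟨t, ht, hp⟩; exact ⟨t, List.mem_cons_of_mem _ ht, hp⟩
      by_cases h1 : rr = sr
      · rw [if_pos h1]
        by_cases h2 : rc < sc
        · rw [if_pos h2, ih]
          have c1 : (if rr = sr ∧ rc < sc then some rc else none) = some rc := if_pos ⟨h1, h2⟩
          have c2 : (if rr = sr ∧ sc < rc then some rc else none) = none := by rw [if_neg]; omega
          have c3 : (if rc = sc ∧ rr < sr then some rr else none) = none := by rw [if_neg]; omega
          have c4 : (if rc = sc ∧ sr < rr then some rr else none) = none := by rw [if_neg]; omega
          simp only [c1, c2, c3, c4, List.foldl_cons, hex, lbs, rbs, dbs, ubs]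
        · rw [if_neg h2, ih]
          have c1 : (if rr = sr ∧ rc < sc then some rc else none) = none := by rw [if_neg]; omega
          have c2 : (if rr = sr ∧ sc < rc then some rc else none) = some rc := by
            rw [if_pos]; constructor; exact h1; omega
          have c3 : (if rc = sc ∧ rr < sr then some rr else none) = none := by rw [if_neg]; omega
          have c4 : (if rc = sc ∧ sr < rr then some rr else none) = none := by rw [if_neg]; omega
          simp only [c1, c2, c3, c4, List.foldl_cons, hex, lbs, rbs, dbs, ubs]
      · rw [if_neg h1]
        by_cases h3 : rc = sc
        · rw [if_pos h3]
          by_cases h4 : rr < sr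
          · rw [if_pos h4, ih]
            have c1 : (if rr = sr ∧ rc < sc then some rc else none) = none := by rw [if_neg]; omega
            have c2 : (if rr = sr ∧ sc < rc then some rc else none) = none := by rw [if_neg]; omega
            have c3 : (if rc = sc ∧ rr < sr then some rr else none) = some rr := if_pos ⟨h3, h4⟩
            have c4 : (if rc = sc ∧ sr < rr then some rr else none) = none := by rw [if_neg]; omega
            simp only [c1, c2, c3, c4, List.foldl_cons, hex, lbs, rbs, dbs, ubs]
          · rw [if_neg h4, ih]
            have c1 : (if rr = sr ∧ rc < sc then some rc else none) = none := by rw [if_neg]; omega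
            have c2 : (if rr = sr ∧ sc < rc then some rc else none) = none := by rw [if_neg]; omega
            have c3 : (if rc = sc ∧ rr < sr then some rr else none) = none := by rw [if_neg]; omega
            have c4 : (if rc = sc ∧ sr < rr then some rr else none) = some rr := by
              rw [if_pos]; constructor; exact h3; omega
            simp only [c1, c2, c3, c4, List.foldl_cons, hex, lbs, rbs, dbs, ubs]
        · rw [if_neg h3, ih]
          have c1 : (if rr = sr ∧ rc < sc then some rc else none) = none := by rw [if_neg]; omega
          have c2 : (if rr = sr ∧ sc < rc then some rc else none) = none := by rw [if_neg]; omega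
          have c3 : (if rc = sc ∧ rr < sr then some rr else none) = none := by rw [if_neg]; omega
          have c4 : (if rc = sc ∧ sr < rr then some rr else none) = none := by rw [if_neg]; omega
          simp only [c1, c2, c3, c4, hex, lbs, rbs, dbs, ubs]

theorem foldl_updMax_spec : ∀ (xs : List Int) (o : Option Int) (v : Int),
    xs.foldl updMax o = some v →
    (o = some v ∨ v ∈ xs) ∧ (∀ w : Int, (o = some w → w ≤ v) ∧ (w ∈ xs → w ≤ v)) := by
  intro xs
  induction xs with
  | nil => intro o v h; simp at h; simp [h]
  | cons x rest ih =>
    intro o v h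
    rw [List.foldl_cons] at h
    obtain ⟨hm, hub⟩ := ih (updMax o x) v h
    constructor
    · rcases hm with hm | hm
      · cases o with
        | none => simp [updMax] at hm; right; simp [hm]
        | some w =>
          simp only [updMax] at hm
          split at hm
          · right; simp at hm; simp [hm]
          · left; simp at hm; simp [hm]
      · right; exact List.mem_cons_of_mem _ hm
    · intro w
      constructor
      · intro hw
        have := (hub w).1
        cases o with
        | none => simp at hw
        | some z =>
          have hzw : z = w := by simpa using hw
          subst hzw
          by_cases hwx : z < x
          · have hx := (hub x).1 (by simp [updMax, hwx])
            omega
          · exact this (by simp [updMax, hwx])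
      · intro hw
        rcases List.mem_cons.mp hw with rfl | hmem
        · cases o with
          | none => exact (hub w).1 (by simp [updMax])
          | some z =>
            simp only [updMax] at hub
            by_cases hz : z < w
            · exact (hub w).1 (by rw [if_pos hz])
            · have := (hub z).1 (by rw [if_neg hz]); omega
        · exact (hub w).2 hmem

theorem foldl_updMin_spec : ∀ (xs : List Int) (o : Option Int) (v : Int),
    xs.foldl updMin o = some v →
    (o = some v ∨ v ∈ xs) ∧ (∀ w : Int, (o = some w → v ≤ w) ∧ (w ∈ xs → v ≤ w)) := by
  intro xs
  induction xs with
  | nil => intro o v h; simp at h; simp [h]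
  | cons x rest ih =>
    intro o v h
    rw [List.foldl_cons] at h
    obtain ⟨hm, hub⟩ := ih (updMin o x) v h
    constructor
    · rcases hm with hm | hm
      · cases o with
        | none => simp [updMin] at hm; right; simp [hm]
        | some w =>
          simp only [updMin] at hm
          split at hm
          · right; simp at hm; simp [hm]
          · left; simp at hm; simp [hm]
      · right; exact List.mem_cons_of_mem _ hm
    · intro w
      constructor
      · intro hw
        have := (hub w).1
        cases o with
        | none => simp at hw
        | some z =>
          have hzw : z = w := by simpa using hw
          subst hzw
          by_cases hwx : x < z
          · have hx := (hub x).1 (by simp [updMin, hwx])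
            omega
          · exact this (by simp [updMin, hwx])
      · intro hw
        rcases List.mem_cons.mp hw with rfl | hmem
        · cases o with
          | none => exact (hub w).1 (by simp [updMin])
          | some z =>
            simp only [updMin] at hub
            by_cases hz : w < z
            · exact (hub w).1 (by rw [if_pos hz])
            · have := (hub z).1 (by rw [if_neg hz]); omega
        · exact (hub w).2 hmem

theorem foldl_updMax_isSome : ∀ (xs : List Int) (v : Int), ∃ w, xs.foldl updMax (some v) = some w := by
  intro xs
  induction xs with
  | nil => intro v; exact ⟨v, rfl⟩
  | cons x rest ih =>
    intro v
    rw [List.foldl_cons]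
    simp only [updMax]
    split
    · exact ih x
    · exact ih v

theorem foldl_updMin_isSome : ∀ (xs : List Int) (v : Int), ∃ w, xs.foldl updMin (some v) = some w := by
  intro xs
  induction xs with
  | nil => intro v; exact ⟨v, rfl⟩
  | cons x rest ih =>
    intro v
    rw [List.foldl_cons]
    simp only [updMin]
    split
    · exact ih x
    · exact ih v

-- direction-check lemmas
theorem checkL_iff (sr sc : Int) (occ : List (Int × Int)) (rs : List (Int × Int × Int)) :
    ((match (lbs sr sc rs).foldl updMax none with
      | some lv => !(occ.any (fun p => decide (p.1 = sr ∧ lv < p.2 ∧ p.2 < sc)))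
      | none => false) = true)
    ↔ ∃ t ∈ rs, t.1 = sr ∧ t.2.1 < sc ∧ ClearRow occ sr t.2.1 sc := by
  constructor
  · intro h
    cases hfold : (lbs sr sc rs).foldl updMax none with
    | none => rw [hfold] at h; simp at h
    | some lv =>
      rw [hfold] at h
      simp only [Bool.not_eq_true', List.any_eq_false, decide_eq_true_eq] at h
      obtain ⟨hm, _⟩ := foldl_updMax_spec _ _ _ hfold
      rcases hm with hm | hm
      · simp at hm
      · simp only [lbs, List.mem_filterMap] at hm
        obtain ⟨t, ht, hif⟩ := hm
        by_cases hc : t.1 = sr ∧ t.2.1 < sc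
        · rw [if_pos hc] at hif
          obtain rfl : t.2.1 = lv := by simpa using hif
          refine ⟨t, ht, hc.1, hc.2, ?_⟩
          intro x hx hmem
          rcases hx with ⟨h1, h2⟩ | ⟨h1, h2⟩
          · exact (h (sr, x) hmem) ⟨rfl, h1, h2⟩
          · omega
        · rw [if_neg hc] at hif; simp at hif
  · rintro ⟨t, ht, hsr, hlt, hclear⟩
    have hmem : t.2.1 ∈ lbs sr sc rs := by
      simp only [lbs, List.mem_filterMap]
      exact ⟨t, ht, by rw [if_pos ⟨hsr, hlt⟩]⟩
    obtain ⟨x, xs, hcons⟩ : ∃ x xs, lbs sr sc rs = x :: xs := by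
      cases hl : lbs sr sc rs with
      | nil => rw [hl] at hmem; simp at hmem
      | cons x xs => exact ⟨x, xs, rfl⟩
    obtain ⟨lv, hlv⟩ := foldl_updMax_isSome xs x
    have hfold : (lbs sr sc rs).foldl updMax none = some lv := by
      rw [hcons, List.foldl_cons]
      simpa [updMax] using hlv
    obtain ⟨hm, hub⟩ := foldl_updMax_spec _ _ _ hfold
    have hle : t.2.1 ≤ lv := (hub t.2.1).2 hmem
    have hlvmem : lv ∈ lbs sr sc rs := hm.resolve_left (by simp)
    have hlvlt : lv < sc := by
      simp only [lbs, List.mem_filterMap] at hlvmem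
      obtain ⟨t', _, hif⟩ := hlvmem
      by_cases hc : t'.1 = sr ∧ t'.2.1 < sc
      · rw [if_pos hc] at hif; simp at hif; omega
      · rw [if_neg hc] at hif; simp at hif
    rw [hfold]
    simp only [Bool.not_eq_true', List.any_eq_false, decide_eq_true_eq]
    rintro p hp ⟨hp1, hp2, hp3⟩
    have : (sr, p.2) ∈ occ := by rw [← hp1]; exact hp
    exact hclear p.2 (Or.inl ⟨by omega, hp3⟩) this

theorem checkR_iff (sr sc : Int) (occ : List (Int × Int)) (rs : List (Int × Int × Int)) :
    ((match (rbs sr sc rs).foldl updMin none with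
      | some rv => !(occ.any (fun p => decide (p.1 = sr ∧ sc < p.2 ∧ p.2 < rv)))
      | none => false) = true)
    ↔ ∃ t ∈ rs, t.1 = sr ∧ sc < t.2.1 ∧ ClearRow occ sr t.2.1 sc := by
  constructor
  · intro h
    cases hfold : (rbs sr sc rs).foldl updMin none with
    | none => rw [hfold] at h; simp at h
    | some rv =>
      rw [hfold] at h
      simp only [Bool.not_eq_true', List.any_eq_false, decide_eq_true_eq] at h
      obtain ⟨hm, _⟩ := foldl_updMin_spec _ _ _ hfold
      rcases hm with hm | hm
      · simp at hm
      · simp only [rbs, List.mem_filterMap] at hm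
        obtain ⟨t, ht, hif⟩ := hm
        by_cases hc : t.1 = sr ∧ sc < t.2.1
        · rw [if_pos hc] at hif
          obtain rfl : t.2.1 = rv := by simpa using hif
          refine ⟨t, ht, hc.1, hc.2, ?_⟩
          intro x hx hmem
          rcases hx with ⟨h1, h2⟩ | ⟨h1, h2⟩
          · omega
          · exact (h (sr, x) hmem) ⟨rfl, h1, h2⟩
        · rw [if_neg hc] at hif; simp at hif
  · rintro ⟨t, ht, hsr, hlt, hclear⟩
    have hmem : t.2.1 ∈ rbs sr sc rs := by
      simp only [rbs, List.mem_filterMap]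
      exact ⟨t, ht, by rw [if_pos ⟨hsr, hlt⟩]⟩
    obtain ⟨x, xs, hcons⟩ : ∃ x xs, rbs sr sc rs = x :: xs := by
      cases hl : rbs sr sc rs with
      | nil => rw [hl] at hmem; simp at hmem
      | cons x xs => exact ⟨x, xs, rfl⟩
    obtain ⟨rv, hrv⟩ := foldl_updMin_isSome xs x
    have hfold : (rbs sr sc rs).foldl updMin none = some rv := by
      rw [hcons, List.foldl_cons]
      simpa [updMin] using hrv
    obtain ⟨hm, hub⟩ := foldl_updMin_spec _ _ _ hfold
    have hle : rv ≤ t.2.1 := (hub t.2.1).2 hmem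
    have hrvmem : rv ∈ rbs sr sc rs := hm.resolve_left (by simp)
    have hrvgt : sc < rv := by
      simp only [rbs, List.mem_filterMap] at hrvmem
      obtain ⟨t', _, hif⟩ := hrvmem
      by_cases hc : t'.1 = sr ∧ sc < t'.2.1
      · rw [if_pos hc] at hif; simp at hif; omega
      · rw [if_neg hc] at hif; simp at hif
    rw [hfold]
    simp only [Bool.not_eq_true', List.any_eq_false, decide_eq_true_eq]
    rintro p hp ⟨hp1, hp2, hp3⟩
    have : (sr, p.2) ∈ occ := by rw [← hp1]; exact hp
    exact hclear p.2 (Or.inr ⟨hp2, by omega⟩) this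

theorem checkD_iff (sr sc : Int) (occ : List (Int × Int)) (rs : List (Int × Int × Int)) :
    ((match (dbs sr sc rs).foldl updMax none with
      | some dv => !(occ.any (fun p => decide (p.2 = sc ∧ dv < p.1 ∧ p.1 < sr)))
      | none => false) = true)
    ↔ ∃ t ∈ rs, t.2.1 = sc ∧ t.1 < sr ∧ ClearCol occ sc t.1 sr := by
  constructor
  · intro h
    cases hfold : (dbs sr sc rs).foldl updMax none with
    | none => rw [hfold] at h; simp at h
    | some dv =>
      rw [hfold] at h
      simp only [Bool.not_eq_true', List.any_eq_false, decide_eq_true_eq] at h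
      obtain ⟨hm, _⟩ := foldl_updMax_spec _ _ _ hfold
      rcases hm with hm | hm
      · simp at hm
      · simp only [dbs, List.mem_filterMap] at hm
        obtain ⟨t, ht, hif⟩ := hm
        by_cases hc : t.2.1 = sc ∧ t.1 < sr
        · rw [if_pos hc] at hif
          obtain rfl : t.1 = dv := by simpa using hif
          refine ⟨t, ht, hc.1, hc.2, ?_⟩
          intro x hx hmem
          rcases hx with ⟨h1, h2⟩ | ⟨h1, h2⟩
          · exact (h (x, sc) hmem) ⟨rfl, h1, h2⟩
          · omega
        · rw [if_neg hc] at hif; simp at hif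
  · rintro ⟨t, ht, hsc, hlt, hclear⟩
    have hmem : t.1 ∈ dbs sr sc rs := by
      simp only [dbs, List.mem_filterMap]
      exact ⟨t, ht, by rw [if_pos ⟨hsc, hlt⟩]⟩
    obtain ⟨x, xs, hcons⟩ : ∃ x xs, dbs sr sc rs = x :: xs := by
      cases hl : dbs sr sc rs with
      | nil => rw [hl] at hmem; simp at hmem
      | cons x xs => exact ⟨x, xs, rfl⟩
    obtain ⟨dv, hdv⟩ := foldl_updMax_isSome xs x
    have hfold : (dbs sr sc rs).foldl updMax none = some dv := by
      rw [hcons, List.foldl_cons]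
      simpa [updMax] using hdv
    obtain ⟨hm, hub⟩ := foldl_updMax_spec _ _ _ hfold
    have hle : t.1 ≤ dv := (hub t.1).2 hmem
    have hdvmem : dv ∈ dbs sr sc rs := hm.resolve_left (by simp)
    have hdvlt : dv < sr := by
      simp only [dbs, List.mem_filterMap] at hdvmem
      obtain ⟨t', _, hif⟩ := hdvmem
      by_cases hc : t'.2.1 = sc ∧ t'.1 < sr
      · rw [if_pos hc] at hif; simp at hif; omega
      · rw [if_neg hc] at hif; simp at hif
    rw [hfold]
    simp only [Bool.not_eq_true', List.any_eq_false, decide_eq_true_eq]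
    rintro p hp ⟨hp1, hp2, hp3⟩
    have : (p.1, sc) ∈ occ := by rw [← hp1]; exact hp
    exact hclear p.1 (Or.inl ⟨by omega, hp3⟩) this

theorem checkU_iff (sr sc : Int) (occ : List (Int × Int)) (rs : List (Int × Int × Int)) :
    ((match (ubs sr sc rs).foldl updMin none with
      | some uv => !(occ.any (fun p => decide (p.2 = sc ∧ sr < p.1 ∧ p.1 < uv)))
      | none => false) = true)
    ↔ ∃ t ∈ rs, t.2.1 = sc ∧ sr < t.1 ∧ ClearCol occ sc t.1 sr := by
  constructor
  · intro h
    cases hfold : (ubs sr sc rs).foldl updMin none with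
    | none => rw [hfold] at h; simp at h
    | some uv =>
      rw [hfold] at h
      simp only [Bool.not_eq_true', List.any_eq_false, decide_eq_true_eq] at h
      obtain ⟨hm, _⟩ := foldl_updMin_spec _ _ _ hfold
      rcases hm with hm | hm
      · simp at hm
      · simp only [ubs, List.mem_filterMap] at hm
        obtain ⟨t, ht, hif⟩ := hm
        by_cases hc : t.2.1 = sc ∧ sr < t.1
        · rw [if_pos hc] at hif
          obtain rfl : t.1 = uv := by simpa using hif
          refine ⟨t, ht, hc.1, hc.2, ?_⟩
          intro x hx hmem
          rcases hx with ⟨h1, h2⟩ | ⟨h1, h2⟩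
          · omega
          · exact (h (x, sc) hmem) ⟨rfl, h1, h2⟩
        · rw [if_neg hc] at hif; simp at hif
  · rintro ⟨t, ht, hsc, hlt, hclear⟩
    have hmem : t.1 ∈ ubs sr sc rs := by
      simp only [ubs, List.mem_filterMap]
      exact ⟨t, ht, by rw [if_pos ⟨hsc, hlt⟩]⟩
    obtain ⟨x, xs, hcons⟩ : ∃ x xs, ubs sr sc rs = x :: xs := by
      cases hl : ubs sr sc rs with
      | nil => rw [hl] at hmem; simp at hmem
      | cons x xs => exact ⟨x, xs, rfl⟩
    obtain ⟨uv, huv⟩ := foldl_updMin_isSome xs x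
    have hfold : (ubs sr sc rs).foldl updMin none = some uv := by
      rw [hcons, List.foldl_cons]
      simpa [updMin] using huv
    obtain ⟨hm, hub⟩ := foldl_updMin_spec _ _ _ hfold
    have hle : uv ≤ t.1 := (hub t.1).2 hmem
    have huvmem : uv ∈ ubs sr sc rs := hm.resolve_left (by simp)
    have huvgt : sr < uv := by
      simp only [ubs, List.mem_filterMap] at huvmem
      obtain ⟨t', _, hif⟩ := huvmem
      by_cases hc : t'.2.1 = sc ∧ sr < t'.1
      · rw [if_pos hc] at hif; simp at hif; omega
      · rw [if_neg hc] at hif; simp at hif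
    rw [hfold]
    simp only [Bool.not_eq_true', List.any_eq_false, decide_eq_true_eq]
    rintro p hp ⟨hp1, hp2, hp3⟩
    have : (p.1, sc) ∈ occ := by rw [← hp1]; exact hp
    exact hclear p.1 (Or.inr ⟨hp2, by omega⟩) this

theorem alt_true_iff (sr sc : Int) (occ : List (Int × Int)) (rs : List (Int × Int × Int)) :
    is_square_attacked_by_rook_py_alt (sr, sc) rs occ = true ↔ ∃ t ∈ rs, PAtt sr sc occ t := by
  unfold is_square_attacked_by_rook_py_alt
  dsimp only
  rw [bLoop_closed]
  by_cases honsq : ∃ t ∈ rs, t.1 = sr ∧ t.2.1 = sc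
  · rw [if_pos honsq]
    simp only [true_iff]
    obtain ⟨t, ht, h1, h2⟩ := honsq
    refine ⟨t, ht, Or.inl ⟨h1, ?_⟩⟩
    rw [h2]
    intro x hx
    rcases hx with ⟨ha, hb⟩ | ⟨ha, hb⟩ <;> omega
  · rw [if_neg honsq]
    constructor
    · intro h
      simp only at h
      split_ifs at h with hL hR hD hU
      · obtain ⟨t, ht, h1, _, h3⟩ := (checkL_iff sr sc occ rs).mp hL
        exact ⟨t, ht, Or.inl ⟨h1, h3⟩⟩
      · obtain ⟨t, ht, h1, _, h3⟩ := (checkR_iff sr sc occ rs).mp hR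
        exact ⟨t, ht, Or.inl ⟨h1, h3⟩⟩
      · obtain ⟨t, ht, h1, _, h3⟩ := (checkD_iff sr sc occ rs).mp hD
        exact ⟨t, ht, Or.inr ⟨h1, h3⟩⟩
      · obtain ⟨t, ht, h1, _, h3⟩ := (checkU_iff sr sc occ rs).mp hU
        exact ⟨t, ht, Or.inr ⟨h1, h3⟩⟩
    · rintro ⟨t, ht, hP⟩
      have hnot : ¬(t.1 = sr ∧ t.2.1 = sc) := fun hc => honsq ⟨t, ht, hc⟩
      have hone : ((match (lbs sr sc rs).foldl updMax none with
            | some lv => !(occ.any (fun p => decide (p.1 = sr ∧ lv < p.2 ∧ p.2 < sc)))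
            | none => false) = true) ∨
          ((match (rbs sr sc rs).foldl updMin none with
            | some rv => !(occ.any (fun p => decide (p.1 = sr ∧ sc < p.2 ∧ p.2 < rv)))
            | none => false) = true) ∨
          ((match (dbs sr sc rs).foldl updMax none with
            | some dv => !(occ.any (fun p => decide (p.2 = sc ∧ dv < p.1 ∧ p.1 < sr)))
            | none => false) = true) ∨
          ((match (ubs sr sc rs).foldl updMin none with
            | some uv => !(occ.any (fun p => decide (p.2 = sc ∧ sr < p.1 ∧ p.1 < uv)))
            | none => false) = true) := by
        rcases hP with ⟨h1, h2⟩ | ⟨h1, h2⟩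
        · by_cases hlt : t.2.1 < sc
          · exact Or.inl ((checkL_iff sr sc occ rs).mpr ⟨t, ht, h1, hlt, h2⟩)
          · have : sc < t.2.1 := by
              rcases lt_or_eq_of_le (not_lt.mp hlt) with h | h
              · omega
              · exact absurd ⟨h1, h.symm⟩ hnot
            exact Or.inr (Or.inl ((checkR_iff sr sc occ rs).mpr ⟨t, ht, h1, this, h2⟩))
        · by_cases hlt : t.1 < sr
          · exact Or.inr (Or.inr (Or.inl ((checkD_iff sr sc occ rs).mpr ⟨t, ht, h1, hlt, h2⟩)))
          · have : sr < t.1 := by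
              rcases lt_or_eq_of_le (not_lt.mp hlt) with h | h
              · omega
              · exact absurd ⟨h.symm, h1⟩ hnot
            exact Or.inr (Or.inr (Or.inr ((checkU_iff sr sc occ rs).mpr ⟨t, ht, h1, this, h2⟩)))
      simp only
      split_ifs with hL hR hD hU
      · rfl
      · rfl
      · rfl
      · rfl
      · rcases hone with h | h | h | h
        · exact absurd h hL
        · exact absurd h hR
        · exact absurd h hD
        · exact absurd h hU

-- ===== VERDICT (by name: the statement is the Claim_ definition above) =====
theorem is_square_attacked_by_rook_py_spec : Claim_equal_is_square_attacked_by_rook_py := by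
  intro square rooks occupancy _
  obtain ⟨sr, sc⟩ := square
  unfold Spec_is_square_attacked_by_rook_py
  have hA := aLoop_true_iff sr sc occupancy rooks
  have hB := alt_true_iff sr sc occupancy rooks
  have : is_square_attacked_by_rook_py (sr, sc) rooks occupancy = true ↔
      is_square_attacked_by_rook_py_alt (sr, sc) rooks occupancy = true := by
    rw [hB]; exact hA
  cases hx : is_square_attacked_by_rook_py (sr, sc) rooks occupancy with
  | true => exact (this.mp hx).symm
  | false =>
    cases hy : is_square_attacked_by_rook_py_alt (sr, sc) rooks occupancy with
    | true => rw [← hx, this, hy]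
    | false => rfl
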